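-- pv_equiv track=rewrite | github.com/CancerDataAggregator/transform | python_package/src/cda_etl/auxiliary_scripts/105_rewire_and_fix_GDC_subsample_provenance.py | count_descendant_leaves_with_submitter_ids
-- ===== SOURCE A (Python) =====
-- def count_descendant_leaves_with_submitter_ids( sample_id, children, object_type, submitter_id, target_type ):
--
--     final_count = 0
--
--     if sample_id in children:
--
--         for child_id in children[sample_id]:
--
--             if object_type[child_id] == target_type and child_id not in children:
--
--                 if child_id in submitter_id and submitter_id[child_id] is not None and submitter_id[child_id] != '':
--
--                     final_count = final_count + 1
--
--             elif child_id in children: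
--
--                 final_count = final_count + count_descendant_leaves_with_submitter_ids( child_id, children, object_type, submitter_id, target_type )
--
--     return final_count
-- ===== SOURCE B (Python) =====
-- def count_descendant_leaves_with_submitter_ids( sample_id, children, object_type, submitter_id, target_type ):
--     # Iterative re-implementation: an explicit worklist (stack) replaces the recursion.
--     final_count = 0
--     stack = [ sample_id ]
--     while stack:
--         node = stack.pop()
--         if node in children:
--             for child_id in children[node]:
--                 if object_type[child_id] == target_type and child_id not in children:
--                     if child_id in submitter_id and submitter_id[child_id] is not None and submitter_id[child_id] != '':
--                         final_count = final_count + 1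
--                 elif child_id in children:
--                     stack.append( child_id )
--     return final_count
-- ===== Notes on version B (the rewrite author's own statement) =====
-- stated objective: alternative
-- what changed: The per-child recursion is replaced by a single iterative loop over an explicit worklist stack: internal children are pushed instead of recursed into, and one counter is maintained across the whole traversal.
import Mathlib
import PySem

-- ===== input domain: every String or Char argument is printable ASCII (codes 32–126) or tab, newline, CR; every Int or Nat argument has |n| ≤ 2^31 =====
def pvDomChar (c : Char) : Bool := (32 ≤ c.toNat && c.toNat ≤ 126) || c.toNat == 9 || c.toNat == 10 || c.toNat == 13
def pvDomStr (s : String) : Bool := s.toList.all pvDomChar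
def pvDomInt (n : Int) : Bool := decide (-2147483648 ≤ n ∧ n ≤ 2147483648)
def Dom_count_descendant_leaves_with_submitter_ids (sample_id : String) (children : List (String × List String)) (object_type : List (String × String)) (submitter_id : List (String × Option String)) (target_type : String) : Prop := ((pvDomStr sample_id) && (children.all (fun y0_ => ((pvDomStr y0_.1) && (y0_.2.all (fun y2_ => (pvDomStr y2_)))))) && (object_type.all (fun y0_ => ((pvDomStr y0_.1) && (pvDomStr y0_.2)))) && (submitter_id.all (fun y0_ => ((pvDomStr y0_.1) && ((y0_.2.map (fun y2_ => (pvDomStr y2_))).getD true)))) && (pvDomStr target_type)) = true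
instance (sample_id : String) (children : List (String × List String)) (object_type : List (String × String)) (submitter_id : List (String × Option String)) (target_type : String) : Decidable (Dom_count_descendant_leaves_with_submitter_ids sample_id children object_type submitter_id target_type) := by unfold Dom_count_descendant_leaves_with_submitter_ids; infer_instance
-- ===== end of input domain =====

-- B replaces A's per-child recursion by an explicit worklist (stack) traversal; the return
-- values are proved equal on Pre_ (the inputs where Python A terminates without a KeyError).

-- ===== PORT A =====
-- shared per-child primitives (first-match association-list dict semantics)
def pvChGet (children : List (String × List String)) (k : String) : Option (List String) :=
  (PySem.Dict.mk children).get? k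

def pvKeyed (children : List (String × List String)) (k : String) : Bool :=
  (pvChGet children k).isSome

-- object_type[k]; Pre_ guarantees the key is present wherever either program looks it up
def pvObjT (object_type : List (String × String)) (k : String) : String :=
  (PySem.Dict.mk object_type).getD k ""

def pvHasSub (submitter_id : List (String × Option String)) (k : String) : Bool :=
  match (PySem.Dict.mk submitter_id).get? k with
  | some (some s) => s != ""
  | _ => false

-- A's recursion, with a fuel parameter; under Pre_ the recursion depth is at most
-- children.length, so fuel children.length + 1 is never exhausted.
def pvGoA (children : List (String × List String)) (object_type : List (String × String))
    (submitter_id : List (String × Option String)) (target_type : String) :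
    Nat → String → Int
  | 0, _ => 0
  | fuel + 1, sample_id =>
    match pvChGet children sample_id with
    | none => 0
    | some kids =>
      kids.foldl (fun final_count child_id =>
        if pvObjT object_type child_id == target_type && !pvKeyed children child_id then
          if pvHasSub submitter_id child_id then final_count + 1 else final_count
        else if pvKeyed children child_id then
          final_count + pvGoA children object_type submitter_id target_type fuel child_id
        else final_count) 0

def count_descendant_leaves_with_submitter_ids (sample_id : String) (children : List (String × List String)) (object_type : List (String × String)) (submitter_id : List (String × Option String)) (target_type : String) : Int :=
  pvGoA children object_type submitter_id target_type (children.length + 1) sample_id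

-- ===== PORT B =====
-- exact number of worklist pops B performs under Pre_ (used as B's fuel bound)
def pvSzL (children : List (String × List String)) (allowed ns : List String) : Nat :=
  match ns with
  | [] => 0
  | n :: rest =>
    (match pvChGet children n with
     | none => 1
     | some kids =>
       if _h : n ∈ allowed then
         1 + pvSzL children (allowed.erase n) (kids.filter (pvKeyed children))
       else 1) +
    pvSzL children allowed rest
termination_by (allowed.length, ns.length)
decreasing_by
· have h1 := List.length_erase_of_mem _h
  have h2 := List.length_pos_of_mem _h
  exact Prod.Lex.left _ _ (by omega)
· exact Prod.Lex.right _ (by simp)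

-- Source B's while-loop; the stack is represented top-first (Python's stack.pop() from the end /
-- append at the end become head / cons here), fuel counts loop iterations.
def pvGoB (children : List (String × List String)) (object_type : List (String × String))
    (submitter_id : List (String × Option String)) (target_type : String) :
    Nat → Int → List String → Int
  | 0, final_count, _ => final_count
  | _ + 1, final_count, [] => final_count
  | fuel + 1, final_count, node :: stack =>
    match pvChGet children node with
    | none => pvGoB children object_type submitter_id target_type fuel final_count stack
    | some kids =>
      let st := kids.foldl (fun (p : Int × List String) child_id =>
        if pvObjT object_type child_id == target_type && !pvKeyed children child_id then
          if pvHasSub submitter_id child_id then (p.1 + 1, p.2) else p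
        else if pvKeyed children child_id then (p.1, child_id :: p.2)
        else p) (final_count, stack)
      pvGoB children object_type submitter_id target_type fuel st.1 st.2

def count_descendant_leaves_with_submitter_ids_alt (sample_id : String) (children : List (String × List String)) (object_type : List (String × String)) (submitter_id : List (String × Option String)) (target_type : String) : Int :=
  pvGoB children object_type submitter_id target_type
    (pvSzL children (children.map (·.1)) [sample_id]) 0 [sample_id]

-- ===== PRECONDITION & SPEC =====
-- Bounded check that every descent path from the given nodes visits pairwise-distinct keys of
-- `children` (A's recursion terminates) and that object_type has an entry for every child it
-- meets (no KeyError).  Each step erases the current key from `allowed`, so paths of keyed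
-- nodes have length ≤ allowed.length and fuel allowed.length + 1 is never exhausted.
def pvPathsOk (children : List (String × List String)) (object_type : List (String × String)) :
    Nat → List String → List String → Bool
  | 0, _, _ => false
  | fuel + 1, allowed, ns =>
    ns.all fun n =>
      match pvChGet children n with
      | none => true
      | some kids =>
        decide (n ∈ allowed) &&
        kids.all (fun c => ((PySem.Dict.mk object_type).get? c).isSome) &&
        pvPathsOk children object_type fuel (allowed.erase n) kids

-- Pre_ excludes exactly the inputs on which Python A does not return: it diverges on a cycle
-- of `children` reachable from sample_id, or raises KeyError on a reachable child missing
-- from object_type.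
def Pre_count_descendant_leaves_with_submitter_ids (sample_id : String) (children : List (String × List String)) (object_type : List (String × String)) (submitter_id : List (String × Option String)) (target_type : String) : Prop :=
  pvPathsOk children object_type (children.length + 1) (children.map (·.1)) [sample_id] = true
instance (sample_id : String) (children : List (String × List String)) (object_type : List (String × String)) (submitter_id : List (String × Option String)) (target_type : String) : Decidable (Pre_count_descendant_leaves_with_submitter_ids sample_id children object_type submitter_id target_type) := by unfold Pre_count_descendant_leaves_with_submitter_ids; infer_instance

def pvWitness_count_descendant_leaves_with_submitter_ids : String × (List (String × List String)) × (List (String × String)) × (List (String × Option String)) × String :=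
  ("s", [("s", ["a", "b"]), ("m", ["a"])], [("a", "T"), ("b", "U")], [("a", some "x")], "T")

def Spec_count_descendant_leaves_with_submitter_ids (sample_id : String) (children : List (String × List String)) (object_type : List (String × String)) (submitter_id : List (String × Option String)) (target_type : String) (out : Int) : Prop := out = count_descendant_leaves_with_submitter_ids_alt sample_id children object_type submitter_id target_type
instance (sample_id : String) (children : List (String × List String)) (object_type : List (String × String)) (submitter_id : List (String × Option String)) (target_type : String) (out : Int) : Decidable (Spec_count_descendant_leaves_with_submitter_ids sample_id children object_type submitter_id target_type out) := by unfold Spec_count_descendant_leaves_with_submitter_ids; infer_instance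

-- ===== CLAIM (what is proved, stated in full; the proofs are below) =====
def Claim_equal_count_descendant_leaves_with_submitter_ids : Prop := ∀ (sample_id : String) (children : List (String × List String)) (object_type : List (String × String)) (submitter_id : List (String × Option String)) (target_type : String), Dom_count_descendant_leaves_with_submitter_ids sample_id children object_type submitter_id target_type → Pre_count_descendant_leaves_with_submitter_ids sample_id children object_type submitter_id target_type → Spec_count_descendant_leaves_with_submitter_ids sample_id children object_type submitter_id target_type (count_descendant_leaves_with_submitter_ids sample_id children object_type submitter_id target_type)

-- ===== LEMMAS AND PROOFS =====

-- the value A's recursion computes at a node, with its canonical fuel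
def pvAval (children : List (String × List String)) (object_type : List (String × String))
    (submitter_id : List (String × Option String)) (target_type : String) (n : String) : Int :=
  pvGoA children object_type submitter_id target_type (children.length + 1) n

-- contribution of one child examined by the inner per-child test, leaf part
def pvLeafC (children : List (String × List String)) (object_type : List (String × String))
    (submitter_id : List (String × Option String)) (target_type : String) (c : String) : Int :=
  if pvObjT object_type c == target_type && !pvKeyed children c then
    (if pvHasSub submitter_id c then 1 else 0)
  else 0

lemma pvPathsOk_sub (children : List (String × List String)) (object_type : List (String × String))
    (fl : Nat) (al ns ns' : List String)
    (h : pvPathsOk children object_type fl al ns = true)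
    (hs : ∀ c ∈ ns', c ∈ ns) :
    pvPathsOk children object_type fl al ns' = true := by
  cases fl with
  | zero => simp [pvPathsOk] at h
  | succ fl =>
    simp only [pvPathsOk, List.all_eq_true] at h ⊢
    exact fun c hc => h c (hs c hc)

lemma pvPathsOk_mem_of_keyed (children : List (String × List String)) (object_type : List (String × String))
    (fl : Nat) (al : List String) (c : String)
    (h : pvPathsOk children object_type fl al [c] = true) (hk : pvKeyed children c = true) :
    c ∈ al := by
  cases fl with
  | zero => simp [pvPathsOk] at h
  | succ m =>
    simp only [pvPathsOk, List.all_cons, List.all_nil, Bool.and_true] at h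
    unfold pvKeyed at hk
    cases hch : pvChGet children c with
    | none => simp [hch] at hk
    | some kids =>
      rw [hch] at h
      simp only [Bool.and_eq_true, decide_eq_true_eq] at h
      exact h.1.1

lemma pvGoA_stable (children : List (String × List String)) (object_type : List (String × String))
    (submitter_id : List (String × Option String)) (target_type : String) :
    ∀ (fl : Nat) (al : List String) (n : String) (f g : Nat),
      pvPathsOk children object_type fl al [n] = true →
      al.length ≤ f + 1 → al.length ≤ g + 1 →
      pvGoA children object_type submitter_id target_type (f + 1) n =
        pvGoA children object_type submitter_id target_type (g + 1) n := by
  intro fl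
  induction fl with
  | zero => intro al n f g hOk _ _; simp [pvPathsOk] at hOk
  | succ fl ih =>
    intro al n f g hOk hf hg
    simp only [pvPathsOk, List.all_cons, List.all_nil, Bool.and_true] at hOk
    cases hch : pvChGet children n with
    | none => simp [pvGoA, hch]
    | some kids =>
      rw [hch] at hOk
      simp only [Bool.and_eq_true, decide_eq_true_eq, List.all_eq_true] at hOk
      obtain ⟨⟨hmem, _hot⟩, hrec⟩ := hOk
      have hpos : 1 ≤ al.length := List.length_pos_of_mem hmem
      have hel := List.length_erase_of_mem hmem
      simp only [pvGoA, hch]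
      apply PySem.List.foldl_congr_mem
      intro acc c hc
      by_cases hk : pvKeyed children c = true
      · have hOkc : pvPathsOk children object_type fl (al.erase n) [c] = true :=
          pvPathsOk_sub children object_type fl (al.erase n) kids [c] hrec
            (by intro x hx; simp at hx; simpa [hx] using hc)
        have hcin : c ∈ al.erase n :=
          pvPathsOk_mem_of_keyed children object_type fl (al.erase n) c hOkc hk
        have hcp : 1 ≤ (al.erase n).length := List.length_pos_of_mem hcin
        obtain ⟨f', rfl⟩ : ∃ f', f = f' + 1 := ⟨f - 1, by omega⟩
        obtain ⟨g', rfl⟩ : ∃ g', g = g' + 1 := ⟨g - 1, by omega⟩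
        have := ih (al.erase n) c f' g' hOkc (by omega) (by omega)
        simp [hk, this]
      · simp [hk]

lemma pvGoA_foldl (children : List (String × List String)) (object_type : List (String × String))
    (submitter_id : List (String × Option String)) (target_type : String) (f : Nat) :
    ∀ (kids : List String) (a : Int),
      kids.foldl (fun final_count child_id =>
        if pvObjT object_type child_id == target_type && !pvKeyed children child_id then
          if pvHasSub submitter_id child_id then final_count + 1 else final_count
        else if pvKeyed children child_id then
          final_count + pvGoA children object_type submitter_id target_type f child_id
        else final_count) a =
      a + (kids.map (fun c =>
        pvLeafC children object_type submitter_id target_type c +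
        (if pvKeyed children c then pvGoA children object_type submitter_id target_type f c else 0))).sum := by
  intro kids
  induction kids with
  | nil => simp
  | cons c cs ih =>
    intro a
    simp only [List.foldl_cons, ih, List.map_cons, List.sum_cons]
    unfold pvLeafC
    split_ifs <;> simp_all <;> ring

lemma pvSum_filter (children : List (String × List String)) (h : String → Int) :
    ∀ ns : List String,
      (ns.map (fun c => if pvKeyed children c then h c else 0)).sum =
      ((ns.filter (pvKeyed children)).map h).sum := by
  intro ns
  induction ns with
  | nil => rfl
  | cons c cs ih =>
    by_cases hc : pvKeyed children c = true <;>
      simp [hc, ih]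

lemma pvAval_eq (children : List (String × List String)) (object_type : List (String × String))
    (submitter_id : List (String × Option String)) (target_type : String)
    (fl : Nat) (al : List String) (n : String) (kids : List String)
    (hOk : pvPathsOk children object_type fl al [n] = true)
    (hN : al.length ≤ children.length)
    (hch : pvChGet children n = some kids) :
    pvAval children object_type submitter_id target_type n =
      (kids.map (pvLeafC children object_type submitter_id target_type)).sum +
      ((kids.filter (pvKeyed children)).map (pvAval children object_type submitter_id target_type)).sum := by
  cases fl with
  | zero => simp [pvPathsOk] at hOk
  | succ fl =>
    simp only [pvPathsOk, List.all_cons, List.all_nil, Bool.and_true] at hOk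
    rw [hch] at hOk
    simp only [Bool.and_eq_true, decide_eq_true_eq] at hOk
    obtain ⟨⟨hmem, _hot⟩, hrec⟩ := hOk
    have hpos : 1 ≤ al.length := List.length_pos_of_mem hmem
    have hel := List.length_erase_of_mem hmem
    unfold pvAval
    simp only [pvGoA, hch]
    rw [pvGoA_foldl, zero_add,
      PySem.List.sum_map_add_int kids (pvLeafC children object_type submitter_id target_type)
        (fun c => if pvKeyed children c = true then
          pvGoA children object_type submitter_id target_type children.length c else 0),
      pvSum_filter children (pvGoA children object_type submitter_id target_type children.length)]
    congr 1
    apply congrArg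
    apply List.map_congr_left
    intro c hcf
    have hc : c ∈ kids := List.mem_of_mem_filter hcf
    have hk : pvKeyed children c = true := List.of_mem_filter hcf
    have hOkc : pvPathsOk children object_type fl (al.erase n) [c] = true :=
      pvPathsOk_sub children object_type fl (al.erase n) kids [c] hrec
        (by intro x hx; simp at hx; simpa [hx] using hc)
    have hN1 : 1 ≤ children.length := le_trans hpos hN
    have heq : children.length = (children.length - 1) + 1 := by omega
    have hstab := pvGoA_stable children object_type submitter_id target_type fl (al.erase n) c
      (children.length - 1) children.length hOkc (by omega) (by omega)
    show pvGoA children object_type submitter_id target_type children.length c =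
      pvAval children object_type submitter_id target_type c
    unfold pvAval
    conv_lhs => rw [heq]
    exact hstab

lemma pvGoB_foldl (children : List (String × List String)) (object_type : List (String × String))
    (submitter_id : List (String × Option String)) (target_type : String) :
    ∀ (kids : List String) (acc : Int) (rest : List String),
      kids.foldl (fun (p : Int × List String) child_id =>
        if pvObjT object_type child_id == target_type && !pvKeyed children child_id then
          if pvHasSub submitter_id child_id then (p.1 + 1, p.2) else p
        else if pvKeyed children child_id then (p.1, child_id :: p.2)
        else p) (acc, rest) =
      (acc + (kids.map (pvLeafC children object_type submitter_id target_type)).sum,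
       (kids.filter (pvKeyed children)).reverse ++ rest) := by
  intro kids
  induction kids with
  | nil => simp
  | cons c cs ih =>
    intro acc rest
    simp only [List.foldl_cons, List.map_cons, List.sum_cons, List.filter_cons]
    split_ifs <;> simp_all [pvLeafC] <;> omega

lemma pvSzL_nil (children : List (String × List String)) (al : List String) :
    pvSzL children al [] = 0 := by
  rw [pvSzL]

lemma pvSzL_cons (children : List (String × List String)) (al : List String) (n : String) (rest : List String) :
    pvSzL children al (n :: rest) =
      (match pvChGet children n with
       | none => 1
       | some kids =>
         if n ∈ al then 1 + pvSzL children (al.erase n) (kids.filter (pvKeyed children)) else 1) +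
      pvSzL children al rest := by
  rw [pvSzL]
  split
  · rfl
  · split <;> rfl

lemma pvSzL_append (children : List (String × List String)) (al : List String) :
    ∀ (l1 l2 : List String), pvSzL children al (l1 ++ l2) = pvSzL children al l1 + pvSzL children al l2 := by
  intro l1 l2
  induction l1 with
  | nil => simp [pvSzL_nil]
  | cons n rest ih => simp only [List.cons_append, pvSzL_cons, ih]; omega

lemma pvSzL_reverse (children : List (String × List String)) (al : List String) :
    ∀ (l : List String), pvSzL children al l.reverse = pvSzL children al l := by
  intro l
  induction l with
  | nil => rfl
  | cons n rest ih =>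
    rw [List.reverse_cons, pvSzL_append, ih, pvSzL_cons, pvSzL_cons, pvSzL_nil]
    omega

lemma pvArithB1 (S2 f' : Nat) (h : 1 + S2 ≤ f' + 1) : S2 ≤ f' := by omega

lemma pvArithB2 (S2 f' : Nat) (h : 1 + S2 ≤ f' + 1) : f' - S2 = f' + 1 - (1 + S2) := by omega

lemma pvArithB3 (S1 S2 f' : Nat) (h : 1 + S1 + S2 ≤ f' + 1) : S1 ≤ f' := by omega

lemma pvArithB4 (S1 S2 f' : Nat) (h : 1 + S1 + S2 ≤ f' + 1) : S2 ≤ f' - S1 := by omega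

lemma pvArithB5 (S1 S2 f' : Nat) (h : 1 + S1 + S2 ≤ f' + 1) : f' - S1 - S2 = f' + 1 - (1 + S1 + S2) := by omega

lemma pvGoB_run (children : List (String × List String)) (object_type : List (String × String))
    (submitter_id : List (String × Option String)) (target_type : String) :
    ∀ (fl : Nat) (al ns : List String),
      pvPathsOk children object_type fl al ns = true →
      al.length ≤ children.length →
      ∀ (f : Nat) (acc : Int) (rest : List String),
        pvSzL children al ns ≤ f →
        pvGoB children object_type submitter_id target_type f acc (ns ++ rest) =
          pvGoB children object_type submitter_id target_type (f - pvSzL children al ns)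
            (acc + (ns.map (pvAval children object_type submitter_id target_type)).sum) rest := by
  intro fl
  induction fl with
  | zero => intro al ns h; simp [pvPathsOk] at h
  | succ fl ih =>
    intro al ns
    induction ns with
    | nil => intro _ _ f acc rest _; simp [pvSzL_nil]
    | cons n rest' ihn =>
      intro hOk hN f acc rest hf
      have hOkn : pvPathsOk children object_type (fl + 1) al [n] = true :=
        pvPathsOk_sub children object_type (fl + 1) al (n :: rest') [n] hOk
          (by intro c hc; simp at hc; simp [hc])
      have hOkr : pvPathsOk children object_type (fl + 1) al rest' = true :=
        pvPathsOk_sub children object_type (fl + 1) al (n :: rest') rest' hOk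
          (by intro c hc; simp [hc])
      cases hch : pvChGet children n with
      | none =>
        simp only [pvSzL_cons, hch] at hf
        obtain ⟨f', rfl⟩ : ∃ f', f = f' + 1 :=
          ⟨f - 1, (Nat.sub_add_cancel (le_trans (Nat.le_add_right 1 _) hf)).symm⟩
        have hstep :
            pvGoB children object_type submitter_id target_type (f' + 1) acc ((n :: rest') ++ rest) =
            pvGoB children object_type submitter_id target_type f' acc (rest' ++ rest) := by
          simp [pvGoB, hch]
        rw [hstep, ihn hOkr hN f' acc rest (pvArithB1 _ _ hf)]
        have hA : pvAval children object_type submitter_id target_type n = 0 := by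
          simp [pvAval, pvGoA, hch]
        simp only [pvSzL_cons, hch, List.map_cons, List.sum_cons, hA, zero_add]
        congr 1
        exact pvArithB2 _ _ hf
      | some kids =>
        have h1 := hOkn
        simp only [pvPathsOk, List.all_cons, List.all_nil, Bool.and_true] at h1
        rw [hch] at h1
        simp only [Bool.and_eq_true, decide_eq_true_eq] at h1
        obtain ⟨⟨hmem, _hot⟩, hrec⟩ := h1
        have hel := List.length_erase_of_mem hmem
        simp only [pvSzL_cons, hch, hmem, if_true] at hf
        obtain ⟨f', rfl⟩ : ∃ f', f = f' + 1 :=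
          ⟨f - 1, (Nat.sub_add_cancel (le_trans (le_trans (Nat.le_add_right 1 _) (Nat.le_add_right _ _)) hf)).symm⟩
        have hstep :
            pvGoB children object_type submitter_id target_type (f' + 1) acc ((n :: rest') ++ rest) =
            pvGoB children object_type submitter_id target_type f'
              (acc + (kids.map (pvLeafC children object_type submitter_id target_type)).sum)
              ((kids.filter (pvKeyed children)).reverse ++ (rest' ++ rest)) := by
          simp only [List.cons_append, pvGoB, hch, pvGoB_foldl]
        rw [hstep]
        have hrecR : pvPathsOk children object_type fl (al.erase n)
            ((kids.filter (pvKeyed children)).reverse) = true :=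
          pvPathsOk_sub children object_type fl (al.erase n) kids
            ((kids.filter (pvKeyed children)).reverse) hrec
            (by intro c hc; simp only [List.mem_reverse, List.mem_filter] at hc; exact hc.1)
        have hrev := pvSzL_reverse children (al.erase n) (kids.filter (pvKeyed children))
        have hlen' : (al.erase n).length ≤ children.length := by
          rw [hel]; exact le_trans (Nat.sub_le _ _) hN
        rw [ih (al.erase n) ((kids.filter (pvKeyed children)).reverse) hrecR hlen' f'
          (acc + (kids.map (pvLeafC children object_type submitter_id target_type)).sum)
          (rest' ++ rest) (by rw [hrev]; exact pvArithB3 _ _ _ hf)]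
        rw [hrev, ihn hOkr hN _ _ rest (pvArithB4 _ _ _ hf)]
        have hAv := pvAval_eq children object_type submitter_id target_type (fl + 1) al n kids hOkn hN hch
        simp only [pvSzL_cons, hch, hmem, if_true, List.map_cons, List.sum_cons,
          List.map_reverse, List.sum_reverse, hAv]
        congr 1
        · exact pvArithB5 _ _ _ hf
        · ring
-- ===== VERDICT (by name: the statement is the Claim_ definition above) =====
theorem count_descendant_leaves_with_submitter_ids_spec : Claim_equal_count_descendant_leaves_with_submitter_ids := by
  intro sample_id children object_type submitter_id target_type _hDom hPre
  unfold Spec_count_descendant_leaves_with_submitter_ids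
  unfold count_descendant_leaves_with_submitter_ids count_descendant_leaves_with_submitter_ids_alt
  unfold Pre_count_descendant_leaves_with_submitter_ids at hPre
  have h := pvGoB_run children object_type submitter_id target_type (children.length + 1)
    (children.map (·.1)) [sample_id] hPre (by simp) (pvSzL children (children.map (·.1)) [sample_id])
    0 [] (le_refl _)
  simp only [List.append_nil, Nat.sub_self, List.map_cons, List.map_nil, List.sum_cons,
    List.sum_nil, add_zero, zero_add] at h
  rw [h]
  rfl
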